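-- pv_equiv track=rewrite | github.com/Saurabhkumar726/Coding-Practice | GFG/2026-03-27_chocolates-pickup.py | maxChocolate
-- ===== SOURCE A (Python) =====
-- def maxChocolate(grid):
--     n = len(grid)
--     m = len(grid[0])
--
--     dp = [[[-1] * m for _ in range(m)] for _ in range(n)]
--
--     def solve(i, j1, j2):
--
--         if j1 < 0 or j1 >= m or j2 < 0 or j2 >= m:
--             return float('-inf')
--
--         if i == n - 1:
--             if j1 == j2:
--                 return grid[i][j1]
--             else:
--                 return grid[i][j1] + grid[i][j2]
--
--         if dp[i][j1][j2] != -1: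
--             return dp[i][j1][j2]
--
--         if j1 == j2:
--             chocolates = grid[i][j1]
--         else:
--             chocolates = grid[i][j1] + grid[i][j2]
--
--         max_next = float('-inf')
--         for dj1 in [-1, 0, 1]:
--             for dj2 in [-1, 0, 1]:
--                 max_next = max(max_next, solve(i + 1, j1 + dj1, j2 + dj2))
--
--         dp[i][j1][j2] = chocolates + max_next
--         return dp[i][j1][j2]
--
--     return solve(0, 0, m - 1)
-- ===== SOURCE B (Python) =====
-- def maxChocolate(grid):
--     n, m = len(grid), len(grid[0])
--
--     def cell(i, j1, j2):
--         return grid[i][j1] if j1 == j2 else grid[i][j1] + grid[i][j2]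
--
--     dp = [[cell(n - 1, j1, j2) for j2 in range(m)] for j1 in range(m)]
--     i = n - 2
--     while i >= 0:
--         dp = [[cell(i, j1, j2)
--                + max(dp[a][b]
--                      for a in (j1 - 1, j1, j1 + 1) if 0 <= a < m
--                      for b in (j2 - 1, j2, j2 + 1) if 0 <= b < m)
--                for j2 in range(m)]
--               for j1 in range(m)]
--         i -= 1
--     return dp[0][m - 1]
-- ===== Notes on version B (the rewrite author's own statement) =====
-- stated objective: alternative
-- what changed: Replaced the memoized top-down recursion over (row, j1, j2) with a bottom-up row-by-row tabulation that keeps only one m x m table and takes the max over the in-bounds neighbour entries directly, so no memo array, no recursion and no float('-inf') sentinel are needed.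
-- outside the precondition, e.g. on maxChocolate([[]]): A returns -inf, B raises IndexError; on maxChocolate([]): A raises IndexError, B raises IndexError
import Mathlib
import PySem

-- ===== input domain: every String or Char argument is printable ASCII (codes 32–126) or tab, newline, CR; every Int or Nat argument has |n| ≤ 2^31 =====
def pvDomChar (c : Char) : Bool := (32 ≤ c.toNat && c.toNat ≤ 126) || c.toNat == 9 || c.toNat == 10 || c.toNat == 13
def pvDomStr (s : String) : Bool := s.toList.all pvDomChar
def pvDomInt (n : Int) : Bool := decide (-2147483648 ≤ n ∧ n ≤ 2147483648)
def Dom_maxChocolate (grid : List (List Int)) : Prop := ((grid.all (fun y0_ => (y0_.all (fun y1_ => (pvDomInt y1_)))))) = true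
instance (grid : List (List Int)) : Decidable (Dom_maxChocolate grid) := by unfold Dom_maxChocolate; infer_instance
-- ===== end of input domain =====

-- B replaces A's memoized top-down recursion by a bottom-up row-by-row tabulation
-- keeping a single m×m table (no memo array, no recursion, no -inf sentinel).

-- ===== PORT A =====
-- grid[i][j] for indices known to be in range (Pre_ guarantees this on every access)
def pvGet2 (g : List (List Int)) (i j : Nat) : Int := (g.getD i []).getD j 0

-- the repeated `grid[i][j1] if j1 == j2 else grid[i][j1] + grid[i][j2]`
def pvCellA (g : List (List Int)) (i a b : Nat) : Int :=
  if a = b then pvGet2 g i a else pvGet2 g i a + pvGet2 g i b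

-- Python's max where float('-inf') is `none`
def pvOmax : Option Int → Option Int → Option Int
  | none, y => y
  | some x, none => some x
  | some x, some y => some (max x y)

-- the nested `for dj1 in [-1,0,1]: for dj2 in [-1,0,1]` pairs, in loop order
def pvMoves : List (Int × Int) :=
  ([-1, 0, 1] : List Int).flatMap fun d1 => ([-1, 0, 1] : List Int).map fun d2 => (d1, d2)

-- A's `solve`, memo table threaded as a function (Nat triple (i,j1,j2) ↦ stored value, -1 = empty,
-- exactly the dp array); recursion on k = n-1-i (Python recurses i → i+1 until i = n-1).
-- A result of `none` is Python's float('-inf').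
def pvSolveA (g : List (List Int)) (n m : Nat) :
    Nat → Int → Int → (Nat × Nat × Nat → Int) → Option Int × (Nat × Nat × Nat → Int)
  | 0, j1, j2, dp =>
    if j1 < 0 ∨ (m : Int) ≤ j1 ∨ j2 < 0 ∨ (m : Int) ≤ j2 then (none, dp)
    else (some (pvCellA g (n - 1) j1.toNat j2.toNat), dp)
  | k + 1, j1, j2, dp =>
    if j1 < 0 ∨ (m : Int) ≤ j1 ∨ j2 < 0 ∨ (m : Int) ≤ j2 then (none, dp)
    else
      let i := n - 1 - (k + 1)
      let a := j1.toNat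
      let b := j2.toNat
      if dp (i, a, b) ≠ -1 then (some (dp (i, a, b)), dp)
      else
        let choc := pvCellA g i a b
        let r := pvMoves.foldl
          (fun acc d =>
            let s := pvSolveA g n m k (j1 + d.1) (j2 + d.2) acc.2
            (pvOmax acc.1 s.1, s.2))
          (none, dp)
        let v := r.1.map (fun t => choc + t)
        (v, fun key => if key = (i, a, b) then v.getD (dp key) else r.2 key)

def maxChocolate (grid : List (List Int)) : Int :=
  let n := grid.length
  let m := (grid.getD 0 []).length
  ((pvSolveA grid n m (n - 1) 0 ((m : Int) - 1) (fun _ => -1)).1).getD 0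

-- ===== PORT B =====
def pvCellB (g : List (List Int)) (i j1 j2 : Nat) : Int :=
  if j1 = j2 then pvGet2 g i j1 else pvGet2 g i j1 + pvGet2 g i j2

-- `[dp[a][b] for a in (j1-1,j1,j1+1) if 0<=a<m for b in (j2-1,j2,j2+1) if 0<=b<m]`
def pvNbrs (prev : List (List Int)) (m j1 j2 : Nat) : List Int :=
  (([(j1 : Int) - 1, (j1 : Int), (j1 : Int) + 1].filter
      (fun a => decide (0 ≤ a ∧ a < (m : Int)))).flatMap
    fun a =>
      ([(j2 : Int) - 1, (j2 : Int), (j2 : Int) + 1].filter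
          (fun b => decide (0 ≤ b ∧ b < (m : Int)))).map
        fun b => pvGet2 prev a.toNat b.toNat)

-- one iteration of the while loop, building the table for row i from the one for row i+1
def pvStepB (g : List (List Int)) (m i : Nat) (prev : List (List Int)) : List (List Int) :=
  (List.range m).map fun j1 =>
    (List.range m).map fun j2 =>
      pvCellB g i j1 j2 + ((pvNbrs prev m j1 j2).max?.getD 0)

-- `while i >= 0: dp = step; i -= 1`, counter c = i + 1
def pvLoopB (g : List (List Int)) (m : Nat) : Nat → List (List Int) → List (List Int)
  | 0, dp => dp
  | c + 1, dp => pvLoopB g m c (pvStepB g m c dp)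

def maxChocolate_alt (grid : List (List Int)) : Int :=
  let n := grid.length
  let m := (grid.getD 0 []).length
  let dp0 := (List.range m).map fun j1 => (List.range m).map fun j2 => pvCellB grid (n - 1) j1 j2
  let dp := pvLoopB grid m (n - 1) dp0
  (dp.getD 0 []).getD (m - 1) 0

-- ===== PRECONDITION & SPEC =====
-- Pre_ excludes grids where A does not return an int: the empty grid (len(grid[0]) raises
-- IndexError), ragged grids with a row shorter than the first (IndexError on grid[i][j]),
-- and zero-width grids like [[]] where A returns float('-inf'), not an int.
def Pre_maxChocolate (grid : List (List Int)) : Prop :=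
  grid ≠ [] ∧ 0 < (grid.headD []).length ∧
    ∀ row ∈ grid, (grid.headD []).length ≤ row.length
instance (grid : List (List Int)) : Decidable (Pre_maxChocolate grid) := by
  unfold Pre_maxChocolate; infer_instance

def pvWitness_maxChocolate : List (List Int) := [[1, 2], [3, 4]]

def Spec_maxChocolate (grid : List (List Int)) (out : Int) : Prop := out = maxChocolate_alt grid
instance (grid : List (List Int)) (out : Int) : Decidable (Spec_maxChocolate grid out) := by
  unfold Spec_maxChocolate; infer_instance

-- ===== CLAIM (what is proved, stated in full; the proofs are below) =====
def Claim_equal_maxChocolate : Prop := ∀ (grid : List (List Int)), Dom_maxChocolate grid → Pre_maxChocolate grid → Spec_maxChocolate grid (maxChocolate grid)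

-- ===== LEMMAS AND PROOFS =====

def pvPure (g : List (List Int)) (n m : Nat) : Nat → Int → Int → Option Int
  | 0, j1, j2 =>
    if j1 < 0 ∨ (m : Int) ≤ j1 ∨ j2 < 0 ∨ (m : Int) ≤ j2 then none
    else some (pvCellA g (n - 1) j1.toNat j2.toNat)
  | k + 1, j1, j2 =>
    if j1 < 0 ∨ (m : Int) ≤ j1 ∨ j2 < 0 ∨ (m : Int) ≤ j2 then none
    else
      (pvMoves.foldl (fun acc d => pvOmax acc (pvPure g n m k (j1 + d.1) (j2 + d.2))) none).map
        (fun t => pvCellA g (n - 1 - (k + 1)) j1.toNat j2.toNat + t)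

def pvInv (g : List (List Int)) (n m : Nat) (dp : Nat × Nat × Nat → Int) : Prop :=
  ∀ x a b, dp (x, a, b) = -1 ∨ some (dp (x, a, b)) = pvPure g n m (n - 1 - x) (a : Int) (b : Int)

def pvV (g : List (List Int)) (n m k a b : Nat) : Int :=
  (pvPure g n m k (a : Int) (b : Int)).getD 0

def pvIsTab (g : List (List Int)) (n m k : Nat) (T : List (List Int)) : Prop :=
  ∀ a b : Nat, a < m → b < m → pvGet2 T a b = pvV g n m k a b

theorem pvOmax_assoc (x y z : Option Int) : pvOmax (pvOmax x y) z = pvOmax x (pvOmax y z) := by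
  cases x <;> cases y <;> cases z <;> simp [pvOmax, max_assoc]

theorem pvMax?_cons (x : Int) (xs : List Int) :
    (x :: xs).max? = pvOmax (some x) xs.max? := by
  induction xs generalizing x with
  | nil => simp [pvOmax, List.max?]
  | cons y ys ih => simp [List.max?_cons, pvOmax] at *

theorem pvFoldl_omax {α : Type} (f : α → Option Int) :
    ∀ (L : List α) (o : Option Int),
      L.foldl (fun o d => pvOmax o (f d)) o = pvOmax o (L.filterMap f).max? := by
  intro L
  induction L with
  | nil => intro o; cases o <;> simp [pvOmax]
  | cons d L ih =>
    intro o
    rw [List.foldl_cons, List.filterMap_cons]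
    cases hd : f d with
    | none =>
      rw [show pvOmax o none = o by cases o <;> rfl, ih]
    | some x =>
      rw [ih, pvMax?_cons, ← pvOmax_assoc]

theorem pvPure_oob (g : List (List Int)) (n m k : Nat) (j1 j2 : Int)
    (h : j1 < 0 ∨ (m : Int) ≤ j1 ∨ j2 < 0 ∨ (m : Int) ≤ j2) :
    pvPure g n m k j1 j2 = none := by
  cases k <;> rw [pvPure] <;> rw [if_pos h]

theorem pvPure_isSome (g : List (List Int)) (n m : Nat) :
    ∀ (k : Nat) (j1 j2 : Int), 0 ≤ j1 → j1 < (m : Int) → 0 ≤ j2 → j2 < (m : Int) →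
      (pvPure g n m k j1 j2).isSome := by
  intro k
  induction k with
  | zero =>
    intro j1 j2 h1 h2 h3 h4
    rw [pvPure, if_neg (by omega)]; rfl
  | succ k ih =>
    intro j1 j2 h1 h2 h3 h4
    rw [pvPure, if_neg (by omega)]
    rw [pvFoldl_omax]
    have h00 : ((0 : Int), (0 : Int)) ∈ pvMoves := by decide
    have hf : pvPure g n m k (j1 + 0) (j2 + 0) ≠ none := by
      have := ih (j1 + 0) (j2 + 0) (by omega) (by omega) (by omega) (by omega)
      intro h; rw [h] at this; simp at this
    obtain ⟨v, hv⟩ := Option.ne_none_iff_exists'.mp hf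
    have hmem : v ∈ pvMoves.filterMap (fun d => pvPure g n m k (j1 + d.1) (j2 + d.2)) :=
      List.mem_filterMap.mpr ⟨(0, 0), h00, hv⟩
    have hne : pvMoves.filterMap (fun d => pvPure g n m k (j1 + d.1) (j2 + d.2)) ≠ [] :=
      List.ne_nil_of_mem hmem
    obtain ⟨w, hw⟩ := Option.ne_none_iff_exists'.mp (mt List.max?_eq_none_iff.mp hne)
    simp [pvOmax, hw]

theorem pvPure_char (g : List (List Int)) (n m k : Nat) (j1 j2 : Int) :
    pvPure g n m k j1 j2 =
      if 0 ≤ j1 ∧ j1 < (m : Int) ∧ 0 ≤ j2 ∧ j2 < (m : Int)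
      then some (pvV g n m k j1.toNat j2.toNat) else none := by
  split
  · next h =>
    obtain ⟨h1, h2, h3, h4⟩ := h
    have hs := pvPure_isSome g n m k j1 j2 h1 h2 h3 h4
    obtain ⟨v, hv⟩ := Option.isSome_iff_exists.mp hs
    rw [hv]
    unfold pvV
    rw [Int.toNat_of_nonneg h1, Int.toNat_of_nonneg h3, hv]
    rfl
  · next h => exact pvPure_oob g n m k j1 j2 (by omega)

theorem pvFoldA (g : List (List Int)) (n m k : Nat) (j1 j2 : Int)
    (IH : ∀ (j1 j2 : Int) (dp : Nat × Nat × Nat → Int), pvInv g n m dp →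
      (pvSolveA g n m k j1 j2 dp).1 = pvPure g n m k j1 j2 ∧
      pvInv g n m (pvSolveA g n m k j1 j2 dp).2) :
    ∀ (L : List (Int × Int)) (o : Option Int) (dp : Nat × Nat × Nat → Int), pvInv g n m dp →
      (L.foldl (fun acc d =>
          let s := pvSolveA g n m k (j1 + d.1) (j2 + d.2) acc.2
          (pvOmax acc.1 s.1, s.2)) (o, dp)).1 =
        L.foldl (fun o d => pvOmax o (pvPure g n m k (j1 + d.1) (j2 + d.2))) o ∧
      pvInv g n m (L.foldl (fun acc d =>
          let s := pvSolveA g n m k (j1 + d.1) (j2 + d.2) acc.2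
          (pvOmax acc.1 s.1, s.2)) (o, dp)).2 := by
  intro L
  induction L with
  | nil => intro o dp hdp; exact ⟨rfl, hdp⟩
  | cons d L ihL =>
    intro o dp hdp
    obtain ⟨hv, hi⟩ := IH (j1 + d.1) (j2 + d.2) dp hdp
    have := ihL (pvOmax o (pvSolveA g n m k (j1 + d.1) (j2 + d.2) dp).1)
      (pvSolveA g n m k (j1 + d.1) (j2 + d.2) dp).2 hi
    simpa [hv] using this

theorem pvSolveA_eq (g : List (List Int)) (n m : Nat) :
    ∀ (k : Nat), k ≤ n - 1 → ∀ (j1 j2 : Int) (dp : Nat × Nat × Nat → Int), pvInv g n m dp →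
      (pvSolveA g n m k j1 j2 dp).1 = pvPure g n m k j1 j2 ∧
      pvInv g n m (pvSolveA g n m k j1 j2 dp).2 := by
  intro k
  induction k with
  | zero =>
    intro _ j1 j2 dp hdp
    rw [pvSolveA, pvPure]
    split
    · exact ⟨rfl, hdp⟩
    · exact ⟨rfl, hdp⟩
  | succ k ih =>
    intro hk j1 j2 dp hdp
    have IH := ih (by omega)
    rw [pvSolveA]
    split
    · next hoob => rw [pvPure_oob g n m _ j1 j2 hoob]; exact ⟨rfl, hdp⟩
    · next hoob =>
      simp only []
      split
      · -- memo hit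
        next hhit =>
        rcases hdp (n - 1 - (k + 1)) j1.toNat j2.toNat with h | h
        · exact absurd h hhit
        · constructor
          · rw [h]
            have e1 : n - 1 - (n - 1 - (k + 1)) = k + 1 := by omega
            rw [e1, Int.toNat_of_nonneg (by omega), Int.toNat_of_nonneg (by omega)]
          · exact hdp
      · -- memo miss
        next hmiss =>
        have hm1 : dp (n - 1 - (k + 1), j1.toNat, j2.toNat) = -1 := by
          by_contra hc; exact hmiss hc
        obtain ⟨hv, hi⟩ := pvFoldA g n m k j1 j2 IH pvMoves none dp hdp
        constructor
        · rw [pvPure, if_neg hoob]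
          simp only [hv]
        · intro x a b
          by_cases hkey : ((x, a, b) : Nat × Nat × Nat) = (n - 1 - (k + 1), j1.toNat, j2.toNat)
          · obtain ⟨hx, ha, hb⟩ : x = n - 1 - (k + 1) ∧ a = j1.toNat ∧ b = j2.toNat := by
              simpa [Prod.ext_iff] using hkey
            subst hx; subst ha; subst hb
            simp only [reduceIte]
            cases hr : (pvMoves.foldl (fun acc d =>
                let s := pvSolveA g n m k (j1 + d.1) (j2 + d.2) acc.2
                (pvOmax acc.1 s.1, s.2)) (none, dp)).1 with
            | none =>
              left
              simp only [Option.map_none, Option.getD_none]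
              exact hm1
            | some t =>
              right
              simp only [Option.map_some, Option.getD_some]
              have e1 : n - 1 - (n - 1 - (k + 1)) = k + 1 := by omega
              rw [e1, Int.toNat_of_nonneg (by omega : (0:Int) ≤ j1),
                Int.toNat_of_nonneg (by omega : (0:Int) ≤ j2), pvPure, if_neg hoob]
              rw [← hv, hr]
              rfl
          · simp only [if_neg hkey]
            exact hi x a b

theorem pvNbrs_eq (g : List (List Int)) (n m k : Nat) (prev : List (List Int))
    (hprev : pvIsTab g n m k prev) (a b : Nat) (ha : a < m) (hb : b < m) :
    pvNbrs prev m a b =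
      pvMoves.filterMap (fun d => pvPure g n m k ((a : Int) + d.1) ((b : Int) + d.2)) := by
  have haz : (0:Int) ≤ (a:Int) := by omega
  have ham : ((a:Int)) < m := by exact_mod_cast ha
  have hbz : (0:Int) ≤ (b:Int) := by omega
  have hbm : ((b:Int)) < m := by exact_mod_cast hb
  have h5 : (a:Int) - 1 < m := by omega
  have h6 : (0:Int) ≤ (a:Int) + 1 := by omega
  have h7 : (b:Int) - 1 < m := by omega
  have h8 : (0:Int) ≤ (b:Int) + 1 := by omega
  have hsa : (a:Int) + -1 = (a:Int) - 1 := by ring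
  have hsb : (b:Int) + -1 = (b:Int) - 1 := by ring
  have hL : pvNbrs prev m a b =
      (([(a:Int) - 1, (a:Int), (a:Int) + 1].filter (fun x => decide (0 ≤ x ∧ x < (m:Int)))).flatMap
        fun x => (([(b:Int) - 1, (b:Int), (b:Int) + 1].filter (fun y => decide (0 ≤ y ∧ y < (m:Int)))).map
          fun y => pvV g n m k x.toNat y.toNat)) := by
    unfold pvNbrs
    refine List.flatMap_congr ?_
    intro x hx
    have hxb : 0 ≤ x ∧ x < (m:Int) := by
      have := List.of_mem_filter hx
      simpa using this
    refine List.map_congr_left ?_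
    intro y hy
    have hyb : 0 ≤ y ∧ y < (m:Int) := by
      have := List.of_mem_filter hy
      simpa using this
    exact hprev x.toNat y.toNat (by omega) (by omega)
  rw [hL]
  simp only [pvMoves, pvPure_char g n m k]
  have e2 : ((a:Int) + 1 < (m:Int)) ↔ (a + 1 < m) := by exact_mod_cast Iff.rfl
  have e4 : ((b:Int) + 1 < (m:Int)) ↔ (b + 1 < m) := by exact_mod_cast Iff.rfl
  by_cases c1 : 1 ≤ a <;> by_cases c2 : a + 1 < m <;>
    by_cases c3 : 1 ≤ b <;> by_cases c4 : b + 1 < m <;>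
    simp [c1, c2, c3, c4, haz, ham, hbz, hbm, h5, h6, h7, h8, hsa, hsb, e2, e4]

theorem pvGet2_tab (F : Nat → Nat → Int) (m a b : Nat) (ha : a < m) (hb : b < m) :
    pvGet2 ((List.range m).map fun j1 => (List.range m).map fun j2 => F j1 j2) a b = F a b := by
  simp [pvGet2, List.getD_eq_getElem?_getD, ha, hb]

theorem pvCell_eq (g : List (List Int)) (i a b : Nat) : pvCellB g i a b = pvCellA g i a b := rfl

theorem pvStepB_tab (g : List (List Int)) (n m k : Nat) (prev : List (List Int))
    (hprev : pvIsTab g n m k prev) :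
    pvIsTab g n m (k + 1) (pvStepB g m (n - 2 - k) prev) := by
  intro a b ha hb
  unfold pvStepB
  rw [pvGet2_tab _ m a b ha hb]
  rw [pvNbrs_eq g n m k prev hprev a b ha hb]
  have haz : (0:Int) ≤ (a:Int) := by omega
  have ham : ((a:Int)) < m := by exact_mod_cast ha
  have hbz : (0:Int) ≤ (b:Int) := by omega
  have hbm : ((b:Int)) < m := by exact_mod_cast hb
  unfold pvV
  rw [pvPure, if_neg (by omega), pvFoldl_omax]
  have hf : (pvPure g n m k ((a:Int) + 0) ((b:Int) + 0)).isSome :=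
    pvPure_isSome g n m k _ _ (by omega) (by omega) (by omega) (by omega)
  obtain ⟨v, hv⟩ := Option.isSome_iff_exists.mp hf
  have hmem : v ∈ pvMoves.filterMap (fun d => pvPure g n m k ((a:Int) + d.1) ((b:Int) + d.2)) :=
    List.mem_filterMap.mpr ⟨(0, 0), by decide, hv⟩
  obtain ⟨t, ht⟩ := Option.ne_none_iff_exists'.mp
    (mt List.max?_eq_none_iff.mp (List.ne_nil_of_mem hmem))
  rw [ht]
  simp only [pvOmax, Option.map_some, Option.getD_some]
  rw [pvCell_eq]
  have e1 : n - 1 - (k + 1) = n - 2 - k := by omega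
  simp [e1]

theorem pvLoopB_tab (g : List (List Int)) (n m : Nat) :
    ∀ (c : Nat) (dp : List (List Int)), c ≤ n - 1 → pvIsTab g n m (n - 1 - c) dp →
      pvIsTab g n m (n - 1) (pvLoopB g m c dp) := by
  intro c
  induction c with
  | zero => intro dp _ h; simpa using h
  | succ c ih =>
    intro dp hc h
    rw [pvLoopB]
    apply ih _ (by omega)
    have h' : pvIsTab g n m (n - 2 - c) dp := by
      rw [show n - 1 - (c + 1) = n - 2 - c from by omega] at h; exact h
    have hs := pvStepB_tab g n m (n - 2 - c) dp h'
    rw [show n - 2 - (n - 2 - c) = c from by omega,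
      show (n - 2 - c) + 1 = n - 1 - c from by omega] at hs
    exact hs

theorem maxChocolate_spec_aux (grid : List (List Int)) (hp : Pre_maxChocolate grid) :
    maxChocolate grid = maxChocolate_alt grid := by
  obtain ⟨hne, hm0, _⟩ := hp
  have hhead : grid.headD [] = grid.getD 0 [] := by cases grid <;> rfl
  have hm : 0 < (grid.getD 0 []).length := by rw [← hhead]; exact hm0
  have hn : 0 < grid.length := List.length_pos_of_ne_nil hne
  unfold maxChocolate maxChocolate_alt
  simp only []
  set n := grid.length with hndef
  set m := (grid.getD 0 []).length with hmdef
  -- A side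
  have hInv0 : pvInv grid n m (fun _ => -1) := fun x a b => Or.inl rfl
  obtain ⟨hv, _⟩ := pvSolveA_eq grid n m (n - 1) (le_refl _) 0 ((m : Int) - 1)
    (fun _ => -1) hInv0
  rw [hv, pvPure_char]
  rw [if_pos (by refine ⟨by omega, by omega, by omega, by omega⟩)]
  -- B side
  have h0 : pvIsTab grid n m 0
      ((List.range m).map fun j1 => (List.range m).map fun j2 => pvCellB grid (n - 1) j1 j2) := by
    intro a b ha hb
    rw [pvGet2_tab _ m a b ha hb]
    unfold pvV
    rw [pvPure, if_neg (by omega)]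
    simp [pvCell_eq]
  have htab := pvLoopB_tab grid n m (n - 1)
    ((List.range m).map fun j1 => (List.range m).map fun j2 => pvCellB grid (n - 1) j1 j2)
    (le_refl _) (by rw [Nat.sub_self]; exact h0)
  have hB := htab 0 (m - 1) hm (by omega)
  have em : ((m : Int) - 1).toNat = m - 1 := by omega
  simp only [Option.getD_some, em]
  exact hB.symm

-- ===== VERDICT (by name: the statement is the Claim_ definition above) =====
theorem maxChocolate_spec : Claim_equal_maxChocolate := by
  intro grid _ hp
  exact maxChocolate_spec_aux grid hp
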